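-- pv_equiv track=rewrite | github.com/tomtkg/EC-Comp2021 | conv_sop0.py | get_batch_list
-- ===== SOURCE A (Python) =====
-- N_PROC = 6    # 子プロセスの展開数．
--
-- def get_batch_list(pop):
--     n_ind = len(pop)
--     batch_list, ind_list = [], []
--     for i in range(n_ind):
--         ind_list.append(i)
--         if (i + 1) % N_PROC == 0 or i == n_ind - 1:
--             batch_list.append(ind_list)
--             ind_list = []
--     return batch_list
-- ===== SOURCE B (Python) =====
-- N_PROC = 6    # batch size, as in the original module
--
-- def get_batch_list(pop):
--     n_ind = len(pop)
--     return [list(range(i, min(i + N_PROC, n_ind))) for i in range(0, n_ind, N_PROC)]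
-- ===== Notes on version B (the rewrite author's own statement) =====
-- stated objective: simpler
-- what changed: B computes each batch directly from its start index with a stepped range and min-capped end, replacing A's per-element accumulate-and-flush-on-modulo loop.
import Mathlib
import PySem

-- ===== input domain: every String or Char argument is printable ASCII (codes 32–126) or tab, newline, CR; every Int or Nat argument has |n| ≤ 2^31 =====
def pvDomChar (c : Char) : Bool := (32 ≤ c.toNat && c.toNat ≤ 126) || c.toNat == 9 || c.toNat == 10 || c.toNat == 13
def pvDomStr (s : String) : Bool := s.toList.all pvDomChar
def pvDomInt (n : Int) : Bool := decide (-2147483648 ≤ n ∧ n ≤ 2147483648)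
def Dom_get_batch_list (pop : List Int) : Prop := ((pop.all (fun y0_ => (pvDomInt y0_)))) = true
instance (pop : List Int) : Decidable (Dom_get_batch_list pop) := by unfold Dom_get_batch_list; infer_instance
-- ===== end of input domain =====

-- B replaces A's per-element accumulate-and-flush-on-modulo loop by computing each
-- batch directly from its start index (objective: simpler); return values are equal.

-- ===== PORT A =====
-- literal transliteration of A: fold over range(n_ind) carrying (batch_list, ind_list)
def get_batch_list (pop : List Int) : List (List Int) :=
  let n_ind : Int := pop.length
  ((PySem.List.pyRange 0 n_ind 1).foldl
    (fun (s : List (List Int) × List Int) i =>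
      let ind_list := s.2 ++ [i]
      if PySem.Int.mod (i + 1) 6 == 0 || i == n_ind - 1
      then (s.1 ++ [ind_list], [])
      else (s.1, ind_list))
    ([], [])).1

-- ===== PORT B =====
-- literal transliteration of B: one batch per start index in range(0, n_ind, 6)
def get_batch_list_alt (pop : List Int) : List (List Int) :=
  let n_ind : Int := pop.length
  (PySem.List.pyRange 0 n_ind 6).map
    (fun i => PySem.List.pyRange i (min (i + 6) n_ind) 1)

-- ===== PRECONDITION & SPEC =====
def Spec_get_batch_list (pop : List Int) (out : List (List Int)) : Prop := out = get_batch_list_alt pop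
instance (pop : List Int) (out : List (List Int)) : Decidable (Spec_get_batch_list pop out) := by unfold Spec_get_batch_list; infer_instance

-- ===== CLAIM (what is proved, stated in full; the proofs are below) =====
def Claim_equal_get_batch_list : Prop := ∀ (pop : List Int), Dom_get_batch_list pop → Spec_get_batch_list pop (get_batch_list pop)

-- ===== LEMMAS AND PROOFS =====

-- A's loop step, with n_ind fixed to (n : Int)
def pvStep (n : Nat) (s : List (List Int) × List Int) (i : Int) : List (List Int) × List Int :=
  let ind_list := s.2 ++ [i]
  if PySem.Int.mod (i + 1) 6 == 0 || i == (n : Int) - 1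
  then (s.1 ++ [ind_list], [])
  else (s.1, ind_list)

-- completed chunks after processing the first k indices (no flush-at-end yet)
def pvFull (k : Nat) : List (List Int) :=
  (List.range (k / 6)).map (fun j => (List.range 6).map (fun t => ((6 * j + t : Nat) : Int)))

-- pending remainder after processing the first k indices
def pvRem (k : Nat) : List Int :=
  (List.range (k % 6)).map (fun t => ((6 * (k / 6) + t : Nat) : Int))

theorem pvMod6 (i : Int) : PySem.Int.mod (i + 1) 6 = (i + 1) % 6 := by
  show (i + 1).fmod 6 = (i + 1) % 6
  rw [Int.fmod_eq_emod, if_pos (Or.inl (by norm_num : (0:Int) ≤ 6))]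
  ring

theorem pvInvariant (n k : Nat) (hk : k < n) :
    ((List.range k).map (fun t => (Nat.cast t : Int))).foldl (pvStep n) ([], []) = (pvFull k, pvRem k) := by
  induction k with
  | zero => simp [pvFull, pvRem]
  | succ k ih =>
    have hkn : k < n := Nat.lt_of_succ_lt hk
    rw [List.range_succ, List.map_append, List.foldl_append, ih hkn]
    simp only [List.map_cons, List.map_nil, List.foldl_cons, List.foldl_nil]
    have hne : ((k : Int) == (n : Int) - 1) = false := by
      simp only [beq_eq_false_iff_ne, ne_eq]
      omega
    by_cases h6 : (k + 1) % 6 = 0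
    · have hmod : (PySem.Int.mod ((k : Int) + 1) 6 == 0) = true := by
        rw [pvMod6]
        simp only [beq_iff_eq]
        omega
      have hcond : (PySem.Int.mod ((k : Int) + 1) 6 == 0 || ((k : Int) == (n : Int) - 1)) = true := by
        rw [hmod, hne]; rfl
      simp only [pvStep]
      rw [if_pos hcond]
      have hfst : pvFull k ++ [pvRem k ++ [(k : Int)]] = pvFull (k + 1) := by
        have hd : (k + 1) / 6 = k / 6 + 1 := by omega
        have hm : k % 6 = 5 := by omega
        simp only [pvFull, hd, List.range_succ, List.map_append, List.map_cons, List.map_nil]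
        congr 1
        simp only [pvRem, hm]
        rw [show List.range 5 = [0,1,2,3,4] from rfl, show List.range 0 = ([] : List Nat) from rfl]
        simp only [List.map_cons, List.map_nil, List.nil_append, List.cons_append, List.cons.injEq, and_true, true_and]
        omega
      have hsnd : ([] : List Int) = pvRem (k + 1) := by
        simp [pvRem, h6]
      rw [hfst, hsnd]
    · have hmod : (PySem.Int.mod ((k : Int) + 1) 6 == 0) = false := by
        rw [pvMod6]
        simp only [beq_eq_false_iff_ne, ne_eq]
        omega
      have hcond : (PySem.Int.mod ((k : Int) + 1) 6 == 0 || ((k : Int) == (n : Int) - 1)) = false := by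
        rw [hmod, hne]; rfl
      simp only [pvStep]
      rw [if_neg (by rw [hcond]; exact Bool.false_ne_true)]
      have hfst : pvFull k = pvFull (k + 1) := by
        simp only [pvFull]
        rw [show (k + 1) / 6 = k / 6 from by omega]
      have hsnd : pvRem k ++ [(k : Int)] = pvRem (k + 1) := by
        simp only [pvRem]
        rw [show (k + 1) % 6 = k % 6 + 1 from by omega,
            show (k + 1) / 6 = k / 6 from by omega,
            List.range_succ, List.map_append]
        simp only [List.map_cons, List.map_nil]
        congr 1
        rw [show 6 * (k / 6) + k % 6 = k from by omega]
      rw [hfst, hsnd]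

-- B for length m+1, unfolded to A's flushed final state
theorem pvAltEq (m : Nat) :
    (PySem.List.pyRange 0 ((m + 1 : Nat) : Int) 6).map
      (fun i => PySem.List.pyRange i (min (i + 6) ((m + 1 : Nat) : Int)) 1)
    = pvFull m ++ [pvRem m ++ [(m : Int)]] := by
  rw [PySem.List.pyRange_of_pos 0 ((m + 1 : Nat) : Int) (by norm_num)]
  rw [if_pos (by push_cast; omega : (0 : Int) < ((m + 1 : Nat) : Int))]
  have hq : ((((m + 1 : Nat) : Int) - 0 + 6 - 1) / 6).toNat = m / 6 + 1 := by
    have h1 : (((m + 1 : Nat) : Int) - 0 + 6 - 1) = ((m + 6 : Nat) : Int) := by push_cast; ring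
    have h2 : (((m + 6 : Nat) : Int)) / 6 = (((m + 6) / 6 : Nat) : Int) := by
      rw [Int.natCast_div]; norm_num
    rw [h1, h2, Int.toNat_natCast]; omega
  rw [hq, List.map_map, List.range_succ, List.map_append]
  congr 1
  · -- the full chunks
    simp only [pvFull]
    apply List.map_congr_left
    intro j hj
    rw [List.mem_range] at hj
    simp only [Function.comp]
    rw [show min ((0 : Int) + 6 * (j : Nat) + 6) ((m + 1 : Nat) : Int)
          = (0 : Int) + 6 * (j : Nat) + 6 from by rw [min_eq_left]; push_cast; omega]
    rw [PySem.List.pyRange_one]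
    rw [show ((0 : Int) + 6 * (j : Nat) + 6 - ((0 : Int) + 6 * (j : Nat))).toNat = 6 from by omega]
    apply List.map_congr_left
    intro t ht
    push_cast
    ring
  · -- the final (possibly short) chunk
    simp only [List.map_cons, List.map_nil, Function.comp]
    congr 1
    rw [show min ((0 : Int) + 6 * ((m / 6 : Nat) : Int) + 6) ((m + 1 : Nat) : Int)
          = ((m + 1 : Nat) : Int) from by rw [min_eq_right]; push_cast; omega]
    rw [PySem.List.pyRange_one]
    rw [show (((m + 1 : Nat) : Int) - ((0 : Int) + 6 * ((m / 6 : Nat) : Int))).toNat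
          = m % 6 + 1 from by push_cast; omega]
    rw [List.range_succ, List.map_append]
    simp only [List.map_cons, List.map_nil, pvRem]
    congr 1
    · apply List.map_congr_left
      intro t ht
      push_cast
      ring
    · rw [show ((0 : Int) + 6 * ((m / 6 : Nat) : Int) + ((m % 6 : Nat) : Int)) = (m : Int) from by
          push_cast; omega]

-- ===== VERDICT (by name: the statement is the Claim_ definition above) =====
theorem get_batch_list_spec : Claim_equal_get_batch_list := by
  intro pop _
  show get_batch_list pop = get_batch_list_alt pop
  unfold get_batch_list get_batch_list_alt
  cases hn : pop.length with
  | zero => decide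
  | succ m =>
    show ((PySem.List.pyRange 0 ((m + 1 : Nat) : Int) 1).foldl (pvStep (m + 1)) ([], [])).1
       = (PySem.List.pyRange 0 ((m + 1 : Nat) : Int) 6).map
           (fun i => PySem.List.pyRange i (min (i + 6) ((m + 1 : Nat) : Int)) 1)
    rw [PySem.List.pyRange_zero_natCast (m + 1), List.range_succ, List.map_append,
        List.foldl_append, pvInvariant (m + 1) m (Nat.lt_succ_self m)]
    simp only [List.map_cons, List.map_nil, List.foldl_cons, List.foldl_nil]
    have hflush : (PySem.Int.mod ((m : Int) + 1) 6 == 0 || ((m : Int) == ((m + 1 : Nat) : Int) - 1)) = true := by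
      have hb : ((m : Int) == ((m + 1 : Nat) : Int) - 1) = true := by
        simp only [beq_iff_eq]
        push_cast
        ring
      rw [hb, Bool.or_true]
    simp only [pvStep]
    rw [if_pos hflush, pvAltEq m]
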